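-- pv_equiv track=rewrite | github.com/nakevin96/AlogirithmPrac | algo_prac/leetcode_937.py | sort_logs
-- ===== SOURCE A (Python) =====
-- from typing import List
--
-- def sort_logs(log_list: List[str]):
--     split_log_list = []
--     for log in log_list:
--         split_log_list.append(log.split(' '))
--
--     str_log = []
--     num_log = []
--     for log in split_log_list:
--         if log[1].isdigit():
--             num_log.append(log)
--         else:
--             str_log.append(log)
--
--     str_log.sort(key=lambda x: (x[1:], x[0]))
--     return str_log + num_log
-- ===== SOURCE B (Python) =====
-- from typing import List
--
-- def sort_logs(log_list: List[str]):
--     splits = [log.split(' ') for log in log_list]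
--     def key(x):
--         return (1,) if x[1].isdigit() else (0, x[1:], x[0])
--     return sorted(splits, key=key)
-- ===== Notes on version B (the rewrite author's own statement) =====
-- stated objective: idiomatic
-- what changed: A partitions the split logs into letter-logs and digit-logs, sorts only the letter part, and concatenates; B performs one stable sorted() over all splits with a key that maps digit-logs to a single maximal tie key (1,) and letter-logs to (0, x[1:], x[0]).
-- outside the precondition, e.g. on sort_logs(['abc']): A raises IndexError, B raises IndexError
import Mathlib
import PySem

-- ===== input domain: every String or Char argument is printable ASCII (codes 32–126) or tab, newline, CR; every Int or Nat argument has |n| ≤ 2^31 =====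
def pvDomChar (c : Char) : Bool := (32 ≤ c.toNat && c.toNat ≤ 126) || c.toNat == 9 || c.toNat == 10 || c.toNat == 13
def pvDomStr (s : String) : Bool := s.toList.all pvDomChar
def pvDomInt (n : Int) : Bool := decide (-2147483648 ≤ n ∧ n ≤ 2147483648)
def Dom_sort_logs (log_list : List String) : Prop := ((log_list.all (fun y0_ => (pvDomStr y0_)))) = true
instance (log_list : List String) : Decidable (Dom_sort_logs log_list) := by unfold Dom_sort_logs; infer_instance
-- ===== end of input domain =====

-- B replaces A's partition + sort + concatenate with a single stable keyed sort whose key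
-- sends digit-logs to one maximal tie key; objective: idiomatic/simpler decomposition.

-- ===== PORT A =====
-- log.split(' '): sep is the nonempty literal " ", so split? is always `some`; `.getD []` is exact.
def pvSplit (log : String) : List String := (PySem.Str.split? log " ").getD []

-- log[1].isdigit(); pyGetD with default "" is exact on Pre_ (every split has length ≥ 2).
def pvIsDig (x : List String) : Bool := PySem.Str.strIsdigit (PySem.List.pyGetD x 1 "")

-- A's sort key (x[1:], x[0]): the Python tuple (list-of-str, str) is encoded component by
-- component as a List (List Char); lexicographic < on that encoding is exactly Python's
-- tuple/str comparison (code-point lexicographic, components in order, equal lengths).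
-- x[0] via pyGetD "" is exact: split(' ') always returns a nonempty list.
def pvKeyA (x : List String) : List (List (List Char)) :=
  [(PySem.List.slice x (some 1) none).map String.toList,
   [(PySem.List.pyGetD x 0 "").toList]]

def sort_logs (log_list : List String) : List (List String) :=
  let split_log_list := log_list.foldl (fun acc log => acc ++ [pvSplit log]) []
  let pq := split_log_list.foldl
    (fun (pq : List (List String) × List (List String)) log =>
      if pvIsDig log then (pq.1, pq.2 ++ [log]) else (pq.1 ++ [log], pq.2)) ([], [])
  PySem.List.sorted pq.1 pvKeyA ++ pq.2

-- ===== PORT B =====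
-- B's key: (1,) for digit-logs, (0, x[1:], x[0]) for letter-logs, encoded as a
-- List (List Char) per tuple component (ints 0/1 as [['0']]/[['1']], str s as [s.toList],
-- list of str mapped to toList); lexicographic < on the encoding = Python's tuple comparison.
def pvKeyB (x : List String) : List (List (List Char)) :=
  if pvIsDig x then [[['1']]]
  else [[['0']],
        (PySem.List.slice x (some 1) none).map String.toList,
        [(PySem.List.pyGetD x 0 "").toList]]

def sort_logs_alt (log_list : List String) : List (List String) :=
  PySem.List.sorted (log_list.map pvSplit) pvKeyB

-- ===== PRECONDITION & SPEC =====
-- Pre_ excludes exactly the inputs where Python raises IndexError in both A and B: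
-- a log with no space splits to a single piece and log[1] is out of range.
def Pre_sort_logs (log_list : List String) : Prop :=
  ∀ s ∈ log_list, PySem.Str.isIn " " s = true
instance (log_list : List String) : Decidable (Pre_sort_logs log_list) := by
  unfold Pre_sort_logs; infer_instance
def pvWitness_sort_logs : List String := ["a1 9 2", "g1 act car", "ab1 off"]
def Spec_sort_logs (log_list : List String) (out : List (List String)) : Prop := out = sort_logs_alt log_list
instance (log_list : List String) (out : List (List String)) : Decidable (Spec_sort_logs log_list out) := by unfold Spec_sort_logs; infer_instance

-- ===== CLAIM (what is proved, stated in full; the proofs are below) =====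
def Claim_equal_sort_logs : Prop := ∀ (log_list : List String), Dom_sort_logs log_list → Pre_sort_logs log_list → Spec_sort_logs log_list (sort_logs log_list)

-- ===== LEMMAS AND PROOFS =====

-- keyB on a letter-log is keyA with the flag [['0']] consed on.
theorem pvKeyB_letter (x : List String) (h : pvIsDig x = false) :
    pvKeyB x = [['0']] :: pvKeyA x := by
  simp [pvKeyB, pvKeyA, h]

-- comparison facts
theorem pvKeyB_lt_letter_letter (a b : List String) (ha : pvIsDig a = false)
    (hb : pvIsDig b = false) :
    decide (pvKeyB a < pvKeyB b) = decide (pvKeyA a < pvKeyA b) := by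
  rw [pvKeyB_letter a ha, pvKeyB_letter b hb]
  simp

theorem pvKeyB_lt_letter_digit (a b : List String) (ha : pvIsDig a = false)
    (hb : pvIsDig b = true) : decide (pvKeyB a < pvKeyB b) = true := by
  rw [pvKeyB_letter a ha]
  simp only [pvKeyB, hb, if_true]
  simp [List.cons_lt_cons_iff]

theorem pvKeyB_digit_not_lt (a b : List String) (ha : pvIsDig a = true) :
    decide (pvKeyB a < pvKeyB b) = false := by
  simp only [pvKeyB, ha, if_true]
  by_cases hb : pvIsDig b = true
  · simp [hb]
  · simp only [Bool.not_eq_true] at hb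
    simp [hb, List.cons_lt_cons_iff]

-- insertBy is pointwise: same comparisons against the list give the same result.
theorem insertBy_congr {α : Type} (b b' : α → α → Bool) (x : α) (l : List α)
    (h : ∀ y ∈ l, b x y = b' x y) :
    PySem.List.insertBy b x l = PySem.List.insertBy b' x l := by
  induction l with
  | nil => rfl
  | cons y ys ih =>
    have hy := h y (by simp)
    simp only [PySem.List.insertBy, hy]
    cases hxy : b' x y
    · simp [ih (fun z hz => h z (by simp [hz]))]
    · simp

-- inserting before a suffix every element of which triggers the comparison.
theorem insertBy_append_all_before {α : Type} (b : α → α → Bool) (x : α)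
    (l d : List α) (hd : ∀ y ∈ d, b x y = true) :
    PySem.List.insertBy b x (l ++ d) = PySem.List.insertBy b x l ++ d := by
  induction l with
  | nil =>
    cases d with
    | nil => rfl
    | cons y ys =>
      simp only [List.nil_append, PySem.List.insertBy, hd y (by simp)]
      rfl
  | cons y ys ih =>
    simp only [List.cons_append, PySem.List.insertBy]
    cases hxy : b x y
    · simp [ih]
    · simp

-- A's partition loop is filter twice.
theorem partition_foldl (L : List (List String)) (p q : List (List String)) :
    L.foldl (fun (pq : List (List String) × List (List String)) log =>
        if pvIsDig log then (pq.1, pq.2 ++ [log]) else (pq.1 ++ [log], pq.2)) (p, q)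
      = (p ++ L.filter (fun x => !pvIsDig x), q ++ L.filter pvIsDig) := by
  induction L generalizing p q with
  | nil => simp
  | cons x xs ih =>
    cases hx : pvIsDig x <;>
      simp [hx, ih, List.append_assoc]

-- main invariant: B's insertion loop over all splits, started on letters-so-far ++ digits-so-far,
-- equals A's insertion loop over the letter-logs followed by the digit-logs in encounter order.
theorem main_loop (L : List (List String)) (accL accD : List (List String))
    (hL : ∀ y ∈ accL, pvIsDig y = false) (hD : ∀ y ∈ accD, pvIsDig y = true) :
    L.foldl (fun acc x => PySem.List.insertBy (fun a b => decide (pvKeyB a < pvKeyB b)) x acc)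
        (accL ++ accD)
      = (L.filter (fun x => !pvIsDig x)).foldl
          (fun acc x => PySem.List.insertBy (fun a b => decide (pvKeyA a < pvKeyA b)) x acc) accL
        ++ accD ++ L.filter pvIsDig := by
  induction L generalizing accL accD with
  | nil => simp
  | cons x xs ih =>
    cases hx : pvIsDig x
    · -- letter-log: inserted within accL, before every digit-log of accD
      have h1 : PySem.List.insertBy (fun a b => decide (pvKeyB a < pvKeyB b)) x (accL ++ accD)
          = PySem.List.insertBy (fun a b => decide (pvKeyB a < pvKeyB b)) x accL ++ accD := by
        exact insertBy_append_all_before _ _ _ _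
          (fun y hy => pvKeyB_lt_letter_digit x y hx (hD y hy))
      have h2 : PySem.List.insertBy (fun a b => decide (pvKeyB a < pvKeyB b)) x accL
          = PySem.List.insertBy (fun a b => decide (pvKeyA a < pvKeyA b)) x accL :=
        insertBy_congr _ _ _ _ (fun y hy => pvKeyB_lt_letter_letter x y hx (hL y hy))
      simp only [List.foldl_cons, h1, h2, List.filter_cons, hx]
      rw [ih (PySem.List.insertBy (fun a b => decide (pvKeyA a < pvKeyA b)) x accL) accD
            (fun y hy => by
              rcases (PySem.List.mem_insertBy _ _ _ _).mp hy with h | h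
              · simpa [h] using hx
              · exact hL y h) hD]
      simp
    · -- digit-log: appended at the very end
      have h1 : PySem.List.insertBy (fun a b => decide (pvKeyB a < pvKeyB b)) x (accL ++ accD)
          = accL ++ (accD ++ [x]) := by
        rw [PySem.List.insertBy_of_forall_not_before _ _ _
              (fun y _ => pvKeyB_digit_not_lt x y hx), List.append_assoc]
      simp only [List.foldl_cons, h1, List.filter_cons, hx]
      rw [ih accL (accD ++ [x]) hL (by
        intro y hy
        rcases List.mem_append.mp hy with h | h
        · exact hD y h
        · simp only [List.mem_singleton] at h; subst h; exact hx)]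
      simp [List.append_assoc]

-- ===== VERDICT (by name: the statement is the Claim_ definition above) =====
theorem sort_logs_spec : Claim_equal_sort_logs := by
  intro log_list _ _
  unfold Spec_sort_logs sort_logs sort_logs_alt
  simp only [PySem.List.foldl_append_singleton_eq_map, List.nil_append, partition_foldl]
  rw [PySem.List.sorted_eq_foldl_insertBy, PySem.List.sorted_eq_foldl_insertBy]
  have := main_loop (log_list.map pvSplit) [] [] (by simp) (by simp)
  simp only [List.append_nil] at this
  rw [this]
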